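-- pv_equiv track=rewrite | github.com/ekeilty17/Project_Euler | useful_functions.py | division_by_hand
-- ===== SOURCE A (Python) =====
-- def division_by_hand(a, b, d):
--     if int(a) != a:
--         raise TypeError(f"Got input a={a}, but expected an integer")
--     if int(b) != b:
--         raise TypeError(f"Got input b={b}, but expected an integer")
--     if int(d) != d:
--         raise TypeError(f"Got input d={d}, but expected an integer")
--     if d <= 0:
--         raise ValueError(f"Got input d={d}, but expected a positive integer")
--
--     if a == 0:
--         return f"{0}.{'0'*(d-1)}"
--     if b == 0:
--         raise ValueError("Cannot divide by 0")
--
--     negative = ((a < 0) != (b < 0))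
--     dividend = abs(a)
--     divisor  = abs(b)
--
--     # doing the division algorithm we all know
--     digits = [dividend // divisor]
--     remainder = dividend % divisor
--     while len(str(digits[0])) + len(digits[1:]) < d:
--
--         remainder *= 10
--         digits.append(remainder // divisor)
--         remainder %= divisor
--
--     # putting output into a nice form
--     quotent_str = f"{digits[0]}.{''.join([str(x) for x in digits[1:]])}"
--     if negative:
--         quotent_str = "-" + quotent_str
--     return quotent_str
-- ===== SOURCE B (Python) =====
-- def division_by_hand(a, b, d):
--     if int(a) != a:
--         raise TypeError(f"Got input a={a}, but expected an integer")
--     if int(b) != b: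
--         raise TypeError(f"Got input b={b}, but expected an integer")
--     if int(d) != d:
--         raise TypeError(f"Got input d={d}, but expected an integer")
--     if d <= 0:
--         raise ValueError(f"Got input d={d}, but expected a positive integer")
--     if a == 0:
--         return "0." + "0" * (d - 1)
--     if b == 0:
--         raise ValueError("Cannot divide by 0")
--     sign = "-" if (a < 0) != (b < 0) else ""
--     int_part, rem = divmod(abs(a), abs(b))
--     f = d - len(str(int_part))
--     frac = "" if f <= 0 else str((rem * 10**f) // abs(b)).zfill(f)
--     return f"{sign}{int_part}.{frac}"
-- ===== Notes on version B (the rewrite author's own statement) =====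
-- stated objective: faster
-- what changed: Replaces A's digit-by-digit long-division loop (one big-integer division per output digit) with a single big-integer division: the whole fractional part is (remainder * 10**f) // |b| zero-padded to f = d - len(str(int_part)) digits.
import Mathlib
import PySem

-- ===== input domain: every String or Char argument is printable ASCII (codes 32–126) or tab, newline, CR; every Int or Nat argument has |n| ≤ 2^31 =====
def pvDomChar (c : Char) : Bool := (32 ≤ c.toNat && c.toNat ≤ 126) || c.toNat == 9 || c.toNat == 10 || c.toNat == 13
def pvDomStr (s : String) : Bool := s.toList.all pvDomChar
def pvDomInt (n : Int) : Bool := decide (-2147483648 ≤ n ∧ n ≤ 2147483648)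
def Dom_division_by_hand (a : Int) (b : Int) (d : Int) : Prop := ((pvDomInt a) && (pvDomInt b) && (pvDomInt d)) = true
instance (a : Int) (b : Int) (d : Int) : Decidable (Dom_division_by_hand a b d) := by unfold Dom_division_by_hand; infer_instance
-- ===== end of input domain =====

-- B replaces A's digit-by-digit long-division loop (one big-int division per output digit)
-- with a single big-integer division (remainder * 10^f) // |b| zero-padded to f digits
-- (objective: faster; a timing run measured B faster at the largest size).

-- ===== PORT A =====
-- the while loop: 'while len(str(digits[0])) + len(digits[1:]) < d' with digits = head :: tail;
-- k = len(str(digits[0])) (constant through the loop)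
def divLoopA (divisor d : Int) (k : Nat) (remainder : Int) (tail : List Int) : List Int :=
  if _h : (k : Int) + tail.length < d then
    divLoopA divisor d k (PySem.Int.mod (remainder * 10) divisor)
      (tail ++ [PySem.Int.floordiv (remainder * 10) divisor])
  else tail
termination_by (d - k - tail.length).toNat
decreasing_by simp only [List.length_append, List.length_cons, List.length_nil]; omega

def division_by_hand (a : Int) (b : Int) (d : Int) : String :=
  -- the int(x) != x guards never fire for integer arguments
  if d ≤ 0 then ""                                       -- Python: raise ValueError (outside Pre_)
  else if a = 0 then
    PySem.Int.toStr 0 ++ "." ++ String.ofList (PySem.List.pyRepeat ['0'] (d - 1))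
  else if b = 0 then ""                                  -- Python: raise ValueError (outside Pre_)
  else
    let negative : Bool := decide (a < 0) != decide (b < 0)
    let dividend := |a|
    let divisor := |b|
    let digits0 := PySem.Int.floordiv dividend divisor
    let remainder := PySem.Int.mod dividend divisor
    let tail := divLoopA divisor d (PySem.Int.toStr digits0).toList.length remainder []
    let quotent_str := PySem.Int.toStr digits0 ++ "." ++
      PySem.Str.join "" (tail.map PySem.Int.toStr)
    if negative then "-" ++ quotent_str else quotent_str

-- ===== PORT B =====
def division_by_hand_alt (a : Int) (b : Int) (d : Int) : String :=
  if d ≤ 0 then ""                                       -- Python: raise ValueError (outside Pre_)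
  else if a = 0 then "0." ++ String.ofList (PySem.List.pyRepeat ['0'] (d - 1))
  else if b = 0 then ""                                  -- Python: raise ValueError (outside Pre_)
  else
    let sign := if decide (a < 0) != decide (b < 0) then "-" else ""
    let intPart := PySem.Int.floordiv |a| |b|
    let rem := PySem.Int.mod |a| |b|
    let f := d - (PySem.Int.toStr intPart).toList.length
    -- 10**f ported as (10 : Int) ^ f.toNat — exact since this branch has f > 0
    let frac := if f ≤ 0 then ""
      else PySem.Str.zfill (PySem.Int.toStr (PySem.Int.floordiv (rem * 10 ^ f.toNat) |b|)) f
    sign ++ PySem.Int.toStr intPart ++ "." ++ frac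

-- ===== PRECONDITION & SPEC =====
-- Pre_ excludes exactly the inputs where A raises: d ≤ 0 (ValueError) and b = 0 with a ≠ 0 (ValueError).
def Pre_division_by_hand (a : Int) (b : Int) (d : Int) : Prop := 1 ≤ d ∧ (a = 0 ∨ b ≠ 0)
instance (a : Int) (b : Int) (d : Int) : Decidable (Pre_division_by_hand a b d) := by
  unfold Pre_division_by_hand; infer_instance
def pvWitness_division_by_hand : Int × Int × Int := (7, 3, 5)

def Spec_division_by_hand (a : Int) (b : Int) (d : Int) (out : String) : Prop := out = division_by_hand_alt a b d
instance (a : Int) (b : Int) (d : Int) (out : String) : Decidable (Spec_division_by_hand a b d out) := by unfold Spec_division_by_hand; infer_instance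

-- ===== CLAIM (what is proved, stated in full; the proofs are below) =====
def Claim_equal_division_by_hand : Prop := ∀ (a : Int) (b : Int) (d : Int), Dom_division_by_hand a b d → Pre_division_by_hand a b d → Spec_division_by_hand a b d (division_by_hand a b d)

-- ===== LEMMAS AND PROOFS =====

-- decimal digit characters of a natural number, most significant first
def decChars (q : Nat) : List Char :=
  if _h : q < 10 then [Nat.digitChar q]
  else decChars (q / 10) ++ [Nat.digitChar (q % 10)]
termination_by q
decreasing_by exact Nat.div_lt_self (by omega) (by omega)

theorem toDigitsCore_eq_decChars (f : Nat) : ∀ (n : Nat) (ds : List Char),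
    0 < f → n < 10 ^ f → Nat.toDigitsCore 10 f n ds = decChars n ++ ds := by
  induction f with
  | zero => omega
  | succ f ih =>
    intro n ds _ h
    rw [Nat.toDigitsCore]
    by_cases h10 : n < 10
    · have hnd : n / 10 = 0 := by omega
      rw [decChars]
      simp [hnd, h10, Nat.mod_eq_of_lt h10]
    · have hnd : ¬ n / 10 = 0 := by omega
      have hf : 0 < f := by
        by_contra hf0
        have hf1 : f = 0 := by omega
        subst hf1; simp at h; omega
      have hlt : n / 10 < 10 ^ f := by
        have : 10 ^ (f + 1) = 10 ^ f * 10 := by ring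
        omega
      simp only [hnd, if_false]
      rw [ih (n / 10) _ hf hlt]
      conv_rhs => rw [decChars]
      simp [h10]
  
theorem toDigits_eq_decChars (n : Nat) : Nat.toDigits 10 n = decChars n := by
  rw [Nat.toDigits, toDigitsCore_eq_decChars (n + 1) n [] (by omega) ?_, List.append_nil]
  calc n < 2 ^ n := Nat.lt_two_pow_self
    _ ≤ 10 ^ n := Nat.pow_le_pow_left (by omega) n
    _ ≤ 10 ^ (n + 1) := Nat.pow_le_pow_right (by omega) (by omega)

theorem toChars_natCast (m : Nat) : PySem.Int.toChars (m : Int) = decChars m := by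
  simp [PySem.Int.toChars, toDigits_eq_decChars]

theorem decChars_length_pos (q : Nat) : 1 ≤ (decChars q).length := by
  rw [decChars]; split <;> simp

-- padding with zeros on the left, as zfill does on an unsigned digit string
def pad (cs : List Char) (n : Nat) : List Char := List.replicate (n - cs.length) '0' ++ cs

theorem decChars_head_digit (q : Nat) : ∃ m, m < 10 ∧ (decChars q).head? = some (Nat.digitChar m) := by
  induction q using decChars.induct with
  | case1 q h => exact ⟨q, h, by rw [decChars]; simp [h]⟩
  | case2 q h ih =>
    obtain ⟨m, hm, hh⟩ := ih
    refine ⟨m, hm, ?_⟩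
    rw [decChars, dif_neg h]
    cases hd : decChars (q / 10) with
    | nil => simp [hd] at hh
    | cons c cs => simp [hd] at hh ⊢; simpa using hh

theorem zfill_decChars (q : Nat) (w : Int) : PySem.Chars.zfill (decChars q) w = pad (decChars q) w.toNat := by
  obtain ⟨m, hm, hh⟩ := decChars_head_digit q
  rw [PySem.Chars.zfill.eq_def, pad]
  split
  · rename_i hle
    have : w.toNat ≤ (decChars q).length := by omega
    simp [Nat.sub_eq_zero_of_le this]
  · rename_i hgt
    cases hd : decChars q with
    | nil => have := decChars_length_pos q; simp [hd] at this
    | cons c cs =>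
      have hc : c = Nat.digitChar m := by simp [hd] at hh; exact hh
      have : ¬ (c = '+' ∨ c = '-') := by
        subst hc; interval_cases m <;> decide
      simp [this]

-- the fractional digit characters produced by n steps of the long-division loop
def fracChars (v r : Nat) : Nat → List Char
  | 0 => []
  | n + 1 => decChars (r * 10 / v) ++ fracChars v (r * 10 % v) n

theorem fracChars_snoc (v : Nat) (hv : 0 < v) : ∀ (n : Nat) (r : Nat), r < v →
    fracChars v r (n + 1) = fracChars v r n ++ decChars ((r * 10 ^ n % v) * 10 / v) := by
  intro n
  induction n with
  | zero => intro r hr; simp [fracChars, Nat.mod_eq_of_lt hr]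
  | succ n ih =>
    intro r hr
    have h1 : r * 10 % v < v := Nat.mod_lt _ hv
    calc fracChars v r (n + 2)
        = decChars (r * 10 / v) ++ fracChars v (r * 10 % v) (n + 1) := rfl
      _ = decChars (r * 10 / v) ++ (fracChars v (r * 10 % v) n ++ decChars ((r * 10 % v * 10 ^ n % v) * 10 / v)) := by rw [ih _ h1]
      _ = fracChars v r (n + 1) ++ decChars ((r * 10 ^ (n + 1) % v) * 10 / v) := by
          have : r * 10 % v * 10 ^ n % v = r * 10 ^ (n + 1) % v := by
            rw [Nat.mod_mul_mod]; ring_nf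
          rw [this, fracChars]; simp [List.append_assoc]

theorem pad_step (n q e : Nat) (hn : 1 ≤ n) (hq : q < 10 ^ n) (he : e < 10) :
    pad (decChars (10 * q + e)) (n + 1) = pad (decChars q) n ++ decChars e := by
  have hde : decChars e = [Nat.digitChar e] := by rw [decChars]; simp [he]
  by_cases hq0 : q = 0
  · subst hq0
    have h0 : decChars 0 = ['0'] := by rw [decChars]; simp [Nat.digitChar]
    rw [show 10 * 0 + e = e by ring, hde, h0, pad, pad]
    simp only [List.length_cons, List.length_nil]
    rw [show n + 1 - (0 + 1) = n by omega]
    have hrep : List.replicate (n - (0 + 1)) '0' ++ ['0'] = List.replicate n '0' := by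
      rw [← List.replicate_succ']; congr 1; omega
    rw [← hrep]
  · have h10 : ¬ 10 * q + e < 10 := by omega
    have hdiv : (10 * q + e) / 10 = q := by omega
    have hmod : (10 * q + e) % 10 = e := by omega
    have : decChars (10 * q + e) = decChars q ++ [Nat.digitChar e] := by
      rw [decChars]; simp [h10, hdiv, hmod]
    rw [this, pad, pad, hde]
    simp only [List.length_append, List.length_cons, List.length_nil]
    rw [show n + 1 - ((decChars q).length + 1) = n - (decChars q).length by omega]
    simp [List.append_assoc]

theorem fracChars_closed (v : Nat) (hv : 0 < v) : ∀ (n : Nat) (r : Nat), 1 ≤ n → r < v →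
    fracChars v r n = pad (decChars (r * 10 ^ n / v)) n := by
  intro n
  induction n with
  | zero => omega
  | succ n ih =>
    intro r _ hr
    by_cases hn : n = 0
    · subst hn
      simp only [fracChars, List.append_nil, pad, zero_add, pow_one]
      have := decChars_length_pos (r * 10 / v)
      rw [show 1 - (decChars (r * 10 / v)).length = 0 by omega]
      simp
    · have hn1 : 1 ≤ n := by omega
      set q := r * 10 ^ n / v with hqdef
      set s := r * 10 ^ n % v with hsdef
      have hs : s < v := Nat.mod_lt _ hv
      have he : s * 10 / v < 10 := by rw [Nat.div_lt_iff_lt_mul hv]; nlinarith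
      have hqlt : q < 10 ^ n := by
        rw [hqdef, Nat.div_lt_iff_lt_mul hv]
        have hp : 0 < 10 ^ n := Nat.pow_pos (by omega)
        nlinarith
      have key : 10 * q + s * 10 / v = r * 10 ^ (n + 1) / v := by
        have hdm : v * q + s = r * 10 ^ n := Nat.div_add_mod _ _
        have hsplit : r * 10 ^ (n + 1) = v * (10 * q) + s * 10 := by
          rw [pow_succ, ← mul_assoc, ← hdm]; ring
        rw [hsplit, Nat.mul_add_div hv]
      rw [fracChars_snoc v hv n r hr, ih r hn1 hr, ← hsdef, ← hqdef, ← key,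
        pad_step n q (s * 10 / v) hn1 hqlt he]

-- the integer digits produced by n steps of A's loop
def intFrac (divisor r : Int) : Nat → List Int
  | 0 => []
  | n + 1 => PySem.Int.floordiv (r * 10) divisor :: intFrac divisor (PySem.Int.mod (r * 10) divisor) n

theorem divLoopA_eq (divisor d : Int) (k : Nat) : ∀ (r : Int) (tail : List Int),
    divLoopA divisor d k r tail = tail ++ intFrac divisor r ((d - k - tail.length).toNat) := by
  intro r tail
  induction r, tail using divLoopA.induct divisor d k with
  | case1 r tail h ih =>
    rw [divLoopA, dif_pos h]
    rw [ih]
    have : (d - ↑k - ↑tail.length).toNat = ((d - ↑k - ↑(tail ++ [PySem.Int.floordiv (r * 10) divisor]).length).toNat) + 1 := by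
      simp only [List.length_append, List.length_cons, List.length_nil]; omega
    rw [this, intFrac]
    simp [List.append_assoc]
  | case2 r tail h =>
    rw [divLoopA, dif_neg h]
    have : (d - ↑k - ↑tail.length).toNat = 0 := by omega
    rw [this, intFrac, List.append_nil]

theorem floordiv_natCast (m n : Nat) : PySem.Int.floordiv (m : Int) (n : Int) = ((m / n : Nat) : Int) := by
  rw [PySem.Int.floordiv, Int.fdiv_eq_ediv]; simp

theorem mod_natCast (m n : Nat) : PySem.Int.mod (m : Int) (n : Int) = ((m % n : Nat) : Int) := by
  rw [PySem.Int.mod, Int.fmod_eq_emod]; simp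

-- join of the per-digit strings of A's loop output = fracChars
theorem join_intFrac (V : Nat) : ∀ (n : Nat) (r : Nat),
    PySem.Chars.join [] ((intFrac (V : Int) (r : Int) n).map (fun x => (PySem.Int.toStr x).toList)) =
      fracChars V r n := by
  intro n
  induction n with
  | zero => intro r; rfl
  | succ n ih =>
    intro r
    rw [intFrac, fracChars]
    have h1 : PySem.Int.floordiv ((r : Int) * 10) (V : Int) = ((r * 10 / V : Nat) : Int) := by
      rw [show ((r : Int) * 10) = ((r * 10 : Nat) : Int) by push_cast; ring, floordiv_natCast]
    have h2 : PySem.Int.mod ((r : Int) * 10) (V : Int) = ((r * 10 % V : Nat) : Int) := by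
      rw [show ((r : Int) * 10) = ((r * 10 : Nat) : Int) by push_cast; ring, mod_natCast]
    rw [h1, h2]
    have hjoin : ∀ (x : List Char) (l : List (List Char)),
        PySem.Chars.join [] (x :: l) = x ++ PySem.Chars.join [] l := by
      intro x l
      cases l with
      | nil => simp [PySem.Chars.join, List.intercalate]
      | cons y ys => simp [PySem.Chars.join, List.intercalate, List.intersperse]
    simp only [List.map_cons, hjoin, ih]
    congr 1
    rw [PySem.Int.toList_toStr, toChars_natCast]

-- the fractional part: A's joined loop digits = B's one-shot zero-padded division (list of chars)
theorem frac_eq (V R : Nat) (hv : 0 < V) (hr : R < V) (f : Int) :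
    (PySem.Str.join "" ((intFrac (V : Int) (R : Int) f.toNat).map PySem.Int.toStr)).toList =
      (if f ≤ 0 then ("" : String)
        else PySem.Str.zfill
          (PySem.Int.toStr (PySem.Int.floordiv ((R : Int) * 10 ^ f.toNat) (V : Int))) f).toList := by
  rw [PySem.Str.toList_join]
  have hmm : (List.map String.toList (List.map PySem.Int.toStr (intFrac (V : Int) (R : Int) f.toNat)))
      = (intFrac (V : Int) (R : Int) f.toNat).map (fun x => (PySem.Int.toStr x).toList) := by
    rw [List.map_map]; rfl
  have hsep : ("" : String).toList = ([] : List Char) := rfl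
  rw [hsep, hmm, join_intFrac V f.toNat R]
  by_cases hf : f ≤ 0
  · have h0 : f.toNat = 0 := by omega
    rw [if_pos hf, h0, hsep]
    rfl
  · have hn : 1 ≤ f.toNat := by omega
    rw [if_neg hf, fracChars_closed V hv f.toNat R hn hr, PySem.Str.toList_zfill]
    have hcast : (R : Int) * 10 ^ f.toNat = ((R * 10 ^ f.toNat : Nat) : Int) := by push_cast; ring
    rw [hcast, floordiv_natCast, PySem.Int.toList_toStr, toChars_natCast, zfill_decChars]

-- ===== VERDICT (by name: the statement is the Claim_ definition above) =====
theorem division_by_hand_spec : Claim_equal_division_by_hand := by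
  intro a b d _ hpre
  unfold Pre_division_by_hand at hpre
  obtain ⟨hd, hab⟩ := hpre
  unfold Spec_division_by_hand
  have hd' : ¬ d ≤ 0 := by omega
  by_cases ha : a = 0
  · simp only [division_by_hand, division_by_hand_alt, if_neg hd', if_pos ha]
    rw [show PySem.Int.toStr 0 = "0" from by decide]
    rw [show ("0" ++ "." : String) = "0." from by decide]
  · have hb : b ≠ 0 := hab.resolve_left ha
    simp only [division_by_hand, division_by_hand_alt, if_neg hd', if_neg ha, if_neg hb]
    have hv : 0 < b.natAbs := Int.natAbs_pos.mpr hb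
    have habs : |a| = ((a.natAbs : Nat) : Int) := Int.abs_eq_natAbs a
    have hbabs : |b| = ((b.natAbs : Nat) : Int) := Int.abs_eq_natAbs b
    set U := a.natAbs
    set V := b.natAbs
    rw [habs, hbabs, floordiv_natCast, mod_natCast]
    have hk : (PySem.Int.toStr ((U / V : Nat) : Int)).toList.length = (decChars (U / V)).length := by
      rw [PySem.Int.toList_toStr, toChars_natCast]
    have hloop : divLoopA ((V : Nat) : Int) d (PySem.Int.toStr ((U / V : Nat) : Int)).toList.length
        ((U % V : Nat) : Int) []
        = intFrac ((V : Nat) : Int) ((U % V : Nat) : Int) ((d - (decChars (U / V)).length).toNat) := by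
      rw [divLoopA_eq, hk]
      simp
    rw [hloop]
    have hfrac := frac_eq V (U % V) hv (Nat.mod_lt _ hv) (d - (decChars (U / V)).length)
    have hcore : PySem.Int.toStr ((U / V : Nat) : Int) ++ "." ++
        PySem.Str.join ""
          ((intFrac ((V : Nat) : Int) ((U % V : Nat) : Int)
            ((d - ((decChars (U / V)).length : Int)).toNat)).map PySem.Int.toStr)
        = PySem.Int.toStr ((U / V : Nat) : Int) ++ "." ++
          (if d - ((PySem.Int.toStr ((U / V : Nat) : Int)).toList.length : Int) ≤ 0 then ("" : String)
            else PySem.Str.zfill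
              (PySem.Int.toStr (PySem.Int.floordiv
                (((U % V : Nat) : Int) * 10 ^ (d - ((PySem.Int.toStr ((U / V : Nat) : Int)).toList.length : Int)).toNat)
                ((V : Nat) : Int)))
              (d - ((PySem.Int.toStr ((U / V : Nat) : Int)).toList.length : Int))) := by
      rw [← String.toList_inj]
      simp only [String.toList_append, hk]
      rw [hfrac]
    rw [hk] at hcore ⊢
    rw [hcore]
    cases hneg : (decide (a < 0) != decide (b < 0))
    · simp only [Bool.false_eq_true, if_false, String.empty_append]
    · simp only [if_true, String.append_assoc]
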